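-- pv_equiv track=rewrite | github.com/pypi-data/pypi-mirror-209 | packages/modelbit/modelbit-0.21.2.tar.gz/modelbit-0.21.2/modelbit/environment.py | systemPackagesForPips
-- ===== SOURCE A (Python) =====
-- from typing import List, Tuple, Dict, Optional
--
-- def systemPackagesForPips(pipPackages: List[str]) -> List[str]:
--   systemPackages = set(["libgomp1"])
--   # Add to this list as we find more dependencies that packages need
--   lookups: Dict[str, List[str]] = {
--       "fasttext": ["g++"],
--       "psycopg2": ["libpq5", "libpq-dev"],
--       "opencv-python": ["python3-opencv"],
--   }
--   for pipPackage in pipPackages: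
--     name = pipPackage.split("=")[0].lower()
--     for sysPkg in lookups.get(name, []):
--       systemPackages.add(sysPkg)
--     if pipPackage.startswith("git+"):
--       systemPackages.add("git")
--
--   return sorted(list(systemPackages))
-- ===== SOURCE B (Python) =====
-- def systemPackagesForPips(pipPackages):
--   lookups = {
--       "fasttext": ["g++"],
--       "psycopg2": ["libpq5", "libpq-dev"],
--       "opencv-python": ["python3-opencv"],
--   }
--   names = {p.split("=")[0].lower() for p in pipPackages}
--   systemPackages = {"libgomp1"}
--   for dep, sysPkgs in lookups.items():
--     if dep in names:
--       systemPackages.update(sysPkgs)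
--   if any(p.startswith("git+") for p in pipPackages):
--     systemPackages.add("git")
--   return sorted(systemPackages)
-- ===== Notes on version B (the rewrite author's own statement) =====
-- stated objective: alternative
-- what changed: B inverts the traversal: it builds a set of normalized package names once, then iterates over the fixed dependency table testing membership in that index (plus one any() pass for git+), instead of scanning packages and looking each up in the dict.
import Mathlib
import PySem

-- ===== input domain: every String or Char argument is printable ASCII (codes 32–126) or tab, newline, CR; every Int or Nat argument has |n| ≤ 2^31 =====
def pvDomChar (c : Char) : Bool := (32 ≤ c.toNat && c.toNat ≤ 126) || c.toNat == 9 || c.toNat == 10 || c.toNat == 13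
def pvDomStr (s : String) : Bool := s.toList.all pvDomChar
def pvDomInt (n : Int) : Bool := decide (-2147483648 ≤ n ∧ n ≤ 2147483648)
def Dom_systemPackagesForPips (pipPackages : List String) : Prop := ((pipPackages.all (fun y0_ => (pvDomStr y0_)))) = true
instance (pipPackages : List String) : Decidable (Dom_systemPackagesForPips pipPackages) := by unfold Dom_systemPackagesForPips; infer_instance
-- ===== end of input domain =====

-- B inverts the traversal: a name-set index is built once and the fixed dependency table is
-- scanned against it; same return value, return-value equivalence proved below.

-- ===== PORT A =====
-- name = pipPackage.split("=")[0].lower()  (split? is some: the separator "=" is nonempty)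
def pvName (p : String) : String :=
  PySem.Str.lower (PySem.List.pyGetD ((PySem.Str.split? p "=").getD []) 0 "")

def pvLookups : PySem.Dict String (List String) :=
  ((PySem.Dict.empty.insert "fasttext" ["g++"]).insert "psycopg2"
      ["libpq5", "libpq-dev"]).insert "opencv-python" ["python3-opencv"]

def systemPackagesForPips (pipPackages : List String) : List String :=
  let systemPackages : PySem.Set String :=
    pipPackages.foldl (fun s pipPackage =>
      let s := (pvLookups.getD (pvName pipPackage) []).foldl PySem.Set.add s
      if PySem.Str.startswith pipPackage "git+" then PySem.Set.add s "git" else s)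
      (PySem.Set.ofList ["libgomp1"])
  PySem.List.sorted systemPackages (fun x => x) false

-- ===== PORT B =====
def pvLookupsItems : List (String × List String) :=
  [("fasttext", ["g++"]), ("psycopg2", ["libpq5", "libpq-dev"]),
   ("opencv-python", ["python3-opencv"])]

def systemPackagesForPips_alt (pipPackages : List String) : List String :=
  let names : PySem.Set String := PySem.Set.ofList (pipPackages.map pvName)
  let s0 : PySem.Set String := PySem.Set.ofList ["libgomp1"]
  let s1 : PySem.Set String :=
    pvLookupsItems.foldl (fun s kv =>
      if PySem.Set.contains names kv.1 then PySem.Set.update s kv.2 else s) s0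
  let s2 : PySem.Set String :=
    if pipPackages.any (fun p => PySem.Str.startswith p "git+") then
      PySem.Set.add s1 "git" else s1
  PySem.List.sorted s2 (fun x => x) false

-- ===== PRECONDITION & SPEC =====
def Spec_systemPackagesForPips (pipPackages : List String) (out : List String) : Prop := out = systemPackagesForPips_alt pipPackages
instance (pipPackages : List String) (out : List String) : Decidable (Spec_systemPackagesForPips pipPackages out) := by unfold Spec_systemPackagesForPips; infer_instance

-- ===== CLAIM (what is proved, stated in full; the proofs are below) =====
def Claim_equal_systemPackagesForPips : Prop := ∀ (pipPackages : List String), Dom_systemPackagesForPips pipPackages → Spec_systemPackagesForPips pipPackages (systemPackagesForPips pipPackages)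

-- ===== LEMMAS AND PROOFS =====

-- the fixed dict, read back as three nested ifs
theorem pvLookups_getD (k : String) :
    pvLookups.getD k [] =
      if k = "opencv-python" then ["python3-opencv"]
      else if k = "psycopg2" then ["libpq5", "libpq-dev"]
      else if k = "fasttext" then ["g++"] else [] := by
  unfold pvLookups
  simp [PySem.Dict.getD_insert, PySem.Dict.getD_empty]

-- the inner 'for sysPkg in …: add' loop IS s.update(…)
theorem pvFoldlAdd_eq_update (xs : List String) (s : PySem.Set String) :
    xs.foldl PySem.Set.add s = PySem.Set.update s xs := by
  induction xs generalizing s with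
  | nil => rw [List.foldl_nil, PySem.Set.update_nil]
  | cons x t ih => rw [List.foldl_cons, ih, PySem.Set.update_cons]

theorem mem_ite_add (c : Bool) (s : PySem.Set String) (x y : String) :
    y ∈ (if c then PySem.Set.add s x else s) ↔ y ∈ s ∨ (c = true ∧ y = x) := by
  cases c <;> simp [PySem.Set.mem_add]

theorem mem_ite_update (c : Bool) (s xs : List String) (y : String) :
    y ∈ (if c then PySem.Set.update s xs else s) ↔ y ∈ s ∨ (c = true ∧ y ∈ xs) := by
  cases c <;> simp [PySem.Set.mem_update]

theorem nodup_ite_add (c : Bool) (s : PySem.Set String) (x : String) (h : s.Nodup) :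
    (if c then PySem.Set.add s x else s).Nodup := by
  cases c <;> [exact h; exact PySem.Set.nodup_add s x h]

theorem nodup_ite_update (c : Bool) (s xs : List String) (h : s.Nodup) :
    (if c then PySem.Set.update s xs else s).Nodup := by
  cases c <;> [exact h; exact PySem.Set.nodup_update s xs h]

-- A's loop body, named
def pvStepA (s : PySem.Set String) (p : String) : PySem.Set String :=
  let s := (pvLookups.getD (pvName p) []).foldl PySem.Set.add s
  if PySem.Str.startswith p "git+" then PySem.Set.add s "git" else s

theorem pvStepA_eq (s : PySem.Set String) (p : String) :
    pvStepA s p =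
      (if PySem.Str.startswith p "git+" then
        PySem.Set.add (PySem.Set.update s (pvLookups.getD (pvName p) [])) "git"
      else PySem.Set.update s (pvLookups.getD (pvName p) [])) := by
  unfold pvStepA
  rw [pvFoldlAdd_eq_update]

theorem nodup_foldA (l : List String) (s : PySem.Set String) (h : s.Nodup) :
    (l.foldl pvStepA s).Nodup := by
  induction l generalizing s with
  | nil => exact h
  | cons p t ih =>
    refine ih _ ?_
    rw [pvStepA_eq]
    exact nodup_ite_add _ _ _ (PySem.Set.nodup_update s _ h)

theorem mem_stepA (y : String) (s : PySem.Set String) (p : String) :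
    y ∈ pvStepA s p ↔
      y ∈ s ∨ y ∈ pvLookups.getD (pvName p) [] ∨
        (PySem.Str.startswith p "git+" = true ∧ y = "git") := by
  rw [pvStepA_eq, mem_ite_add, PySem.Set.mem_update]
  exact or_assoc

theorem mem_foldA (y : String) (l : List String) (s : PySem.Set String) :
    y ∈ l.foldl pvStepA s ↔
      y ∈ s ∨ ∃ p ∈ l, y ∈ pvLookups.getD (pvName p) [] ∨
        (PySem.Str.startswith p "git+" = true ∧ y = "git") := by
  induction l generalizing s with
  | nil => simp
  | cons p t ih =>
    rw [List.foldl_cons, ih, mem_stepA]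
    simp only [List.mem_cons]
    constructor
    · rintro ((h | h | h) | ⟨q, hq, hh⟩)
      · exact Or.inl h
      · exact Or.inr ⟨p, Or.inl rfl, Or.inl h⟩
      · exact Or.inr ⟨p, Or.inl rfl, Or.inr h⟩
      · exact Or.inr ⟨q, Or.inr hq, hh⟩
    · rintro (h | ⟨q, (rfl | hq), hh⟩)
      · exact Or.inl (Or.inl h)
      · rcases hh with hh | hh
        · exact Or.inl (Or.inr (Or.inl hh))
        · exact Or.inl (Or.inr (Or.inr hh))
      · exact Or.inr ⟨q, hq, hh⟩

-- B's table loop, membership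
theorem mem_foldB (y : String) (names : PySem.Set String)
    (items : List (String × List String)) (s : PySem.Set String) :
    y ∈ items.foldl (fun s kv =>
        if PySem.Set.contains names kv.1 then PySem.Set.update s kv.2 else s) s ↔
      y ∈ s ∨ ∃ kv ∈ items, PySem.Set.contains names kv.1 = true ∧ y ∈ kv.2 := by
  induction items generalizing s with
  | nil => simp
  | cons kv t ih =>
    rw [List.foldl_cons, ih]
    rw [mem_ite_update]
    simp only [List.mem_cons]
    constructor
    · rintro ((h | ⟨hc, hy⟩) | ⟨q, hq, hh⟩)
      · exact Or.inl h
      · exact Or.inr ⟨kv, Or.inl rfl, hc, hy⟩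
      · exact Or.inr ⟨q, Or.inr hq, hh⟩
    · rintro (h | ⟨q, (rfl | hq), hh⟩)
      · exact Or.inl (Or.inl h)
      · exact Or.inl (Or.inr hh)
      · exact Or.inr ⟨q, hq, hh⟩

theorem nodup_foldB (names : PySem.Set String) (items : List (String × List String))
    (s : PySem.Set String) (h : s.Nodup) :
    (items.foldl (fun s kv =>
        if PySem.Set.contains names kv.1 then PySem.Set.update s kv.2 else s) s).Nodup := by
  induction items generalizing s with
  | nil => exact h
  | cons kv t ih =>
    refine ih _ ?_
    exact nodup_ite_update _ _ _ h

theorem contains_names (pipPackages : List String) (k : String) :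
    PySem.Set.contains (PySem.Set.ofList (pipPackages.map pvName)) k = true ↔
      ∃ p ∈ pipPackages, pvName p = k := by
  rw [PySem.Set.contains_iff, PySem.Set.mem_ofList, List.mem_map]

-- the two result sets have the same members
theorem sets_same_mem (pipPackages : List String) (y : String) :
    y ∈ pipPackages.foldl pvStepA (PySem.Set.ofList ["libgomp1"]) ↔
    y ∈
      (if pipPackages.any (fun p => PySem.Str.startswith p "git+") then
        PySem.Set.add
          (pvLookupsItems.foldl (fun s kv =>
            if PySem.Set.contains (PySem.Set.ofList (pipPackages.map pvName)) kv.1 then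
              PySem.Set.update s kv.2 else s) (PySem.Set.ofList ["libgomp1"])) "git"
      else
        pvLookupsItems.foldl (fun s kv =>
          if PySem.Set.contains (PySem.Set.ofList (pipPackages.map pvName)) kv.1 then
            PySem.Set.update s kv.2 else s) (PySem.Set.ofList ["libgomp1"])) := by
  rw [mem_ite_add, mem_foldB, mem_foldA]
  simp only [PySem.Set.mem_ofList, List.mem_singleton, List.any_eq_true]
  constructor
  · rintro (h | ⟨p, hp, h | ⟨hg, rfl⟩⟩)
    · exact Or.inl (Or.inl h)
    · rw [pvLookups_getD] at h
      split_ifs at h with h3 h2 h1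
      · exact Or.inl (Or.inr ⟨("opencv-python", ["python3-opencv"]), by
          simp [pvLookupsItems], (contains_names _ _).2 ⟨p, hp, h3⟩, h⟩)
      · exact Or.inl (Or.inr ⟨("psycopg2", ["libpq5", "libpq-dev"]), by
          simp [pvLookupsItems], (contains_names _ _).2 ⟨p, hp, h2⟩, h⟩)
      · exact Or.inl (Or.inr ⟨("fasttext", ["g++"]), by
          simp [pvLookupsItems], (contains_names _ _).2 ⟨p, hp, h1⟩, h⟩)
      · simp at h
    · exact Or.inr ⟨⟨p, hp, hg⟩, rfl⟩
  · rintro ((h | ⟨kv, hkv, hc, hy⟩) | ⟨⟨p, hp, hg⟩, rfl⟩)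
    · exact Or.inl h
    · obtain ⟨p, hp, hk⟩ := (contains_names _ _).1 hc
      refine Or.inr ⟨p, hp, Or.inl ?_⟩
      rw [pvLookups_getD, hk]
      simp only [pvLookupsItems, List.mem_cons] at hkv
      rcases hkv with rfl | rfl | rfl | h
      · simpa using hy
      · simpa using hy
      · simpa using hy
      · simp at h
    · exact Or.inr ⟨p, hp, Or.inr ⟨hg, rfl⟩⟩

-- ===== VERDICT (by name: the statement is the Claim_ definition above) =====
theorem systemPackagesForPips_spec : Claim_equal_systemPackagesForPips := by
  intro pipPackages _
  unfold Spec_systemPackagesForPips systemPackagesForPips systemPackagesForPips_alt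
  dsimp only
  set A := pipPackages.foldl pvStepA (PySem.Set.ofList ["libgomp1"]) with hA
  set B := (if pipPackages.any (fun p => PySem.Str.startswith p "git+") then
        PySem.Set.add
          (pvLookupsItems.foldl (fun s kv =>
            if PySem.Set.contains (PySem.Set.ofList (pipPackages.map pvName)) kv.1 then
              PySem.Set.update s kv.2 else s) (PySem.Set.ofList ["libgomp1"])) "git"
      else
        pvLookupsItems.foldl (fun s kv =>
          if PySem.Set.contains (PySem.Set.ofList (pipPackages.map pvName)) kv.1 then
            PySem.Set.update s kv.2 else s) (PySem.Set.ofList ["libgomp1"])) with hB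
  have hfoldA : (pipPackages.foldl (fun s pipPackage =>
      if PySem.Str.startswith pipPackage "git+" then
        PySem.Set.add ((pvLookups.getD (pvName pipPackage) []).foldl PySem.Set.add s) "git"
      else (pvLookups.getD (pvName pipPackage) []).foldl PySem.Set.add s)
      (PySem.Set.ofList ["libgomp1"])) = A := rfl
  rw [hfoldA]
  have hAn : A.Nodup := nodup_foldA _ _ (PySem.Set.nodup_ofList ["libgomp1"])
  have hBn : B.Nodup := by
    rw [hB]
    exact nodup_ite_add _ _ _
      (nodup_foldB (PySem.Set.ofList (pipPackages.map pvName)) pvLookupsItems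
        (PySem.Set.ofList ["libgomp1"]) (PySem.Set.nodup_ofList ["libgomp1"]))
  have hperm : B.Perm A :=
    (List.perm_ext_iff_of_nodup hBn hAn).2 (fun y => (sets_same_mem pipPackages y).symm)
  have hsp : (PySem.List.sorted B (fun x => x) false).Perm A :=
    (PySem.List.sorted_perm B (fun x => x) false).trans hperm
  have hlt : (PySem.List.sorted B (fun x => x) false).Pairwise (fun a b => a < b) := by
    rw [← PySem.Set.ofList_eq_self_of_nodup B hBn]
    exact PySem.List.sorted_ofList_pairwise_lt B
  exact PySem.List.sorted_eq_of_perm_of_pairwise_lt A _ _ hsp hlt
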